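-- pv_equiv track=rewrite | github.com/pyqtrader/pyqtrader | Pyqtrader/Apps/Indicators/EW.py | highest_highs
-- ===== SOURCE A (Python) =====
-- def highest_highs(tshighs, tslows):
--     result = []
--     current = []
--     i = j = 0
--
--     # if no tslow between the last tshigh and the end of the timeseries,
--     # append dummy 0-value tslow at the end to ensure that the last highest high is not lost
--     dummy_appended=False
--     if tslows[-1][0]<=(lh:=tshighs[-1][0]):
--         tslows.append((lh+1,0))
--         dummy_appended=True
--
--     while i < len(tshighs) and j < len(tslows):
--         if tshighs[i][0] < tslows[j][0]:
--             current.append(tshighs[i])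
--             i += 1
--         else:
--             if current:
--                 highest = (current[0][0], current[0][1])
--                 for high in current[1:]:
--                     if high[1] > highest[1]:
--                         highest = high
--                 result.append(highest)
--                 current = []
--             j += 1
--     if current:
--         highest = (current[0][0], current[0][1])
--         for high in current[1:]:
--             if high[1] > highest[1]:
--                 highest = high
--         result.append(highest)
--     #drop the dummy on exit
--     if dummy_appended: tslows.pop()
--     return result
-- ===== SOURCE B (Python) =====
-- def highest_highs(tshighs, tslows):
--     # Two-pass decomposition: first annotate each high with its bucket index
--     # (number of cutoff advances of a single monotone pointer), then reduce
--     # each run of equal bucket indices to its highest high in one scan.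
--     cutoffs = [t for t, _ in tslows]
--     if cutoffs[-1] <= tshighs[-1][0]:
--         cutoffs.append(tshighs[-1][0] + 1)
--     keyed = []
--     j = 0
--     for high in tshighs:
--         while j < len(cutoffs) and high[0] >= cutoffs[j]:
--             j += 1
--         if j == len(cutoffs):
--             break
--         keyed.append((j, high))
--     out = []
--     prev = None
--     for k, (t, v) in keyed:
--         if k != prev:
--             out.append((t, v))
--             prev = k
--         elif v > out[-1][1]:
--             out[-1] = (t, v)
--     return out
-- ===== Notes on version B (the rewrite author's own statement) =====
-- stated objective: alternative
-- what changed: A interleaves one merge loop that buffers each group in a 'current' list and flushes its maximum on every low-advance; B first annotates every high with a bucket index produced by a monotone cutoff pointer over the low times (with the same dummy cutoff), then reduces runs of equal bucket indices to their highest high in a second linear scan, updating the last output element in place.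
import Mathlib
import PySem

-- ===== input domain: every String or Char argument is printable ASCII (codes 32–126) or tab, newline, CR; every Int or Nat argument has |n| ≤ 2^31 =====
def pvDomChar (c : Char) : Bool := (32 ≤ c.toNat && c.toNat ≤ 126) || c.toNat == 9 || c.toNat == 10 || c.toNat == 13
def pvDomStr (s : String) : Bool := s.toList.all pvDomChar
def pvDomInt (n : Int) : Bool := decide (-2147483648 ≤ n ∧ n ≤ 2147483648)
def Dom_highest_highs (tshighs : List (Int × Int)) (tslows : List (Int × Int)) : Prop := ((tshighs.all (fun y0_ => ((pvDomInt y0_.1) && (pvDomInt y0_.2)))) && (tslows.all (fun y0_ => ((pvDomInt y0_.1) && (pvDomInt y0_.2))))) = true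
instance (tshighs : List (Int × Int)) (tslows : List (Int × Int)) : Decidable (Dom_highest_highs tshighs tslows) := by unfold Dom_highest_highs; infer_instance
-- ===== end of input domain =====

-- B replaces A's single merge loop (buffer each group in `current`, flush its maximum on every
-- low-advance) by a two-pass decomposition: annotate each high with a bucket index from a monotone
-- cutoff pointer over the low times, then reduce runs of equal indices in a second scan
-- ("alternative": same cost, different structure). Return-value equivalence only: Python A
-- transiently appends and then pops a dummy element on tslows; B never mutates its arguments.

-- ===== PORT A =====
-- A's `highest = (current[0][0], current[0][1])` copies the pair; for a 2-tuple the copy equals the element.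
def reduceA (c : List (Int × Int)) : Int × Int :=
  match c with
  | [] => (0, 0)   -- unreachable: A only reduces a nonempty `current`
  | x :: rest => rest.foldl (fun highest high => if high.2 > highest.2 then high else highest) (x.1, x.2)

def loopA : List (Int × Int) → List (Int × Int) → List (Int × Int) → List (Int × Int) → List (Int × Int)
  | h :: hs', l :: ls', current, result =>
    if h.1 < l.1 then
      loopA hs' (l :: ls') (current ++ [h]) result
    else
      if current = [] then loopA (h :: hs') ls' current result
      else loopA (h :: hs') ls' [] (result ++ [reduceA current])
  | _, _, current, result => if current = [] then result else result ++ [reduceA current]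
  termination_by hs ls _ _ => hs.length + ls.length

def highest_highs (tshighs : List (Int × Int)) (tslows : List (Int × Int)) : List (Int × Int) :=
  match PySem.List.pyGet? tslows (-1), PySem.List.pyGet? tshighs (-1) with
  | some lastLow, some lastHigh =>
      loopA tshighs
        (if lastLow.1 ≤ lastHigh.1 then tslows ++ [(lastHigh.1 + 1, 0)] else tslows) [] []
  | _, _ => []   -- IndexError on an empty list in Python; excluded by Pre_

-- ===== PORT B =====
-- the inner `while j < len(cutoffs) and high[0] >= cutoffs[j]: j += 1`
def advanceJ (cutoffs : List Int) (t : Int) (j : Nat) : Nat :=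
  if h : j < cutoffs.length then
    if cutoffs[j] ≤ t then advanceJ cutoffs t (j + 1) else j
  else j
  termination_by cutoffs.length - j

-- the first pass building `keyed`
def keyLoop (cutoffs : List Int) : List (Int × Int) → Nat → List (Nat × (Int × Int))
  | [], _ => []
  | high :: hs, j =>
    let j' := advanceJ cutoffs high.1 j
    if j' = cutoffs.length then []   -- break
    else (j', high) :: keyLoop cutoffs hs j'

-- the second pass: runs of equal bucket indices reduced in place (the out[-1] update)
def runReduce : List (Nat × (Int × Int)) → Option Nat → List (Int × Int) → List (Int × Int)
  | [], _, out => out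
  | (k, t, v) :: rest, prev, out =>
    if some k ≠ prev then runReduce rest (some k) (out ++ [(t, v)])
    else if v > (out.getLast?.getD (0, 0)).2 then runReduce rest prev (out.dropLast ++ [(t, v)])
    else runReduce rest prev out

def highest_highs_alt (tshighs : List (Int × Int)) (tslows : List (Int × Int)) : List (Int × Int) :=
  let cutoffs := tslows.map Prod.fst
  match PySem.List.pyGet? cutoffs (-1) with
  | none => []   -- IndexError on an empty list in Python; excluded by Pre_
  | some c =>
    match PySem.List.pyGet? tshighs (-1) with
    | none => []   -- IndexError; excluded by Pre_
    | some lastHigh =>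
        runReduce
          (keyLoop (if c ≤ lastHigh.1 then cutoffs ++ [lastHigh.1 + 1] else cutoffs) tshighs 0)
          none []

-- ===== PRECONDITION & SPEC =====
-- Pre_ excludes exactly the inputs on which Python A raises IndexError (tslows[-1] / tshighs[-1] on an empty list).
def Pre_highest_highs (tshighs : List (Int × Int)) (tslows : List (Int × Int)) : Prop :=
  tshighs ≠ [] ∧ tslows ≠ []
instance (tshighs : List (Int × Int)) (tslows : List (Int × Int)) : Decidable (Pre_highest_highs tshighs tslows) := by unfold Pre_highest_highs; infer_instance
def pvWitness_highest_highs : (List (Int × Int)) × (List (Int × Int)) :=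
  ([(1, 5), (2, 7), (4, 6)], [(3, 0)])

def Spec_highest_highs (tshighs : List (Int × Int)) (tslows : List (Int × Int)) (out : List (Int × Int)) : Prop := out = highest_highs_alt tshighs tslows
instance (tshighs : List (Int × Int)) (tslows : List (Int × Int)) (out : List (Int × Int)) : Decidable (Spec_highest_highs tshighs tslows out) := by unfold Spec_highest_highs; infer_instance

-- ===== CLAIM (what is proved, stated in full; the proofs are below) =====
def Claim_equal_highest_highs : Prop := ∀ (tshighs : List (Int × Int)) (tslows : List (Int × Int)), Dom_highest_highs tshighs tslows → Pre_highest_highs tshighs tslows → Spec_highest_highs tshighs tslows (highest_highs tshighs tslows)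

-- ===== LEMMAS AND PROOFS =====

def shiftK (n : Nat) (keyed : List (Nat × (Int × Int))) : List (Nat × (Int × Int)) :=
  keyed.map (fun p => (p.1 + n, p.2))
def adv (t : Int) : List Int → Nat
  | [] => 0
  | c :: cs => if c ≤ t then adv t cs + 1 else 0
def sKeyed : List (Int × Int) → List Int → List (Nat × (Int × Int))
  | h :: hs', t :: ts' =>
    if t ≤ h.1 then shiftK 1 (sKeyed (h :: hs') ts')
    else (0, h) :: sKeyed hs' (t :: ts')
  | _, _ => []
  termination_by hs ts => hs.length + ts.length
lemma adv_le (t : Int) (ts : List Int) : adv t ts ≤ ts.length := by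
  induction ts with
  | nil => simp [adv]
  | cons c cs ih => simp only [adv]; split
                    · simp; omega
                    · simp
lemma sKeyed_adv (h : Int × Int) (hs : List (Int × Int)) (ts : List Int) :
    sKeyed (h :: hs) ts =
      if adv h.1 ts = ts.length then []
      else (adv h.1 ts, h) :: shiftK (adv h.1 ts) (sKeyed hs (ts.drop (adv h.1 ts))) := by
  induction ts with
  | nil => simp [sKeyed, adv]
  | cons c cs ih =>
    by_cases hc : c ≤ h.1
    · rw [sKeyed, if_pos hc, ih]
      simp only [adv, if_pos hc, List.length_cons]
      by_cases he : adv h.1 cs = cs.length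
      · simp [he, shiftK]
      · have hne1 : ¬ (adv h.1 cs + 1 = cs.length + 1) := by omega
        simp only [he, if_neg hne1]
        simp [shiftK, List.map_map, Function.comp_def, List.drop]
        omega
    · rw [sKeyed, if_neg hc]
      have hlen : adv h.1 (c :: cs) = 0 := by simp [adv, hc]
      simp only [hlen, List.length_cons]
      have hne0 : ¬ (0 = cs.length + 1) := by omega
      simp only [if_neg hne0]
      simp [shiftK]
lemma advanceJ_eq (cutoffs : List Int) (t : Int) (j : Nat) :
    advanceJ cutoffs t j = j + adv t (cutoffs.drop j) := by
  fun_induction advanceJ cutoffs t j with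
  | case1 j h hle ih =>
      rw [ih, ← List.getElem_cons_drop (as := cutoffs) h]
      simp [adv, hle]; omega
  | case2 j h hle =>
      rw [← List.getElem_cons_drop (as := cutoffs) h]
      simp [adv, hle]
  | case3 j h =>
      rw [List.drop_eq_nil_of_le (by omega)]
      simp [adv]
lemma keyLoop_eq (cutoffs : List Int) (hs : List (Int × Int)) (j : Nat) (hj : j ≤ cutoffs.length) :
    keyLoop cutoffs hs j = shiftK j (sKeyed hs (cutoffs.drop j)) := by
  induction hs generalizing j with
  | nil => simp [keyLoop, sKeyed, shiftK]
  | cons h hs' ih =>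
    rw [keyLoop]
    have ha := advanceJ_eq cutoffs h.1 j
    set a := adv h.1 (cutoffs.drop j) with hadef
    have halen : a ≤ cutoffs.length - j := by
      have := adv_le h.1 (cutoffs.drop j); simpa using this
    rw [sKeyed_adv]
    simp only [List.length_drop, ← hadef]
    by_cases hend : a = cutoffs.length - j
    · have hfull : advanceJ cutoffs h.1 j = cutoffs.length := by omega
      simp [hfull, hend, shiftK]
    · have hne : advanceJ cutoffs h.1 j ≠ cutoffs.length := by omega
      rw [if_neg hne, if_neg hend]
      rw [ih (advanceJ cutoffs h.1 j) (by omega)]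
      rw [ha, List.drop_drop]
      simp only [shiftK, List.map_cons, List.map_map, Function.comp_def]
      rw [Nat.add_comm a j]
      refine congrArg _ (List.map_congr_left fun p _ => ?_)
      simp [Nat.add_assoc, Nat.add_comm a j]
lemma runReduce_shift (keyed : List (Nat × (Int × Int))) (n : Nat) (prev : Option Nat)
    (out : List (Int × Int)) :
    runReduce (shiftK n keyed) (prev.map (· + n)) out = runReduce keyed prev out := by
  induction keyed generalizing prev out with
  | nil => simp [shiftK, runReduce]
  | cons p rest ih =>
    obtain ⟨k, t, v⟩ := p
    simp only [shiftK, List.map_cons, runReduce]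
    have hiff : (some (k + n) ≠ prev.map (· + n)) ↔ (some k ≠ prev) := by
      cases prev
      · simp
      · simp
    by_cases hne : some k ≠ prev
    · rw [if_pos (hiff.mpr hne), if_pos hne]
      have := ih (some k) (out ++ [(t, v)])
      simpa [shiftK] using this
    · rw [if_neg (by rw [hiff]; exact hne), if_neg hne]
      split
      · exact ih prev _
      · exact ih prev out
lemma runReduce_shift1_some0 (keyed : List (Nat × (Int × Int))) (out : List (Int × Int)) :
    runReduce (shiftK 1 keyed) (some 0) out = runReduce (shiftK 1 keyed) none out := by
  cases keyed with
  | nil => rfl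
  | cons p rest =>
    obtain ⟨k, t, v⟩ := p
    simp [shiftK, runReduce]
lemma runReduce_append (keyed : List (Nat × (Int × Int))) (prev : Option Nat)
    (o out2 : List (Int × Int)) (h : prev = none ∨ out2 ≠ []) :
    runReduce keyed prev (o ++ out2) = o ++ runReduce keyed prev out2 := by
  induction keyed generalizing prev o out2 with
  | nil => simp [runReduce]
  | cons p rest ih =>
    obtain ⟨k, t, v⟩ := p
    simp only [runReduce]
    by_cases hne : some k ≠ prev
    · rw [if_pos hne, if_pos hne, List.append_assoc]
      exact ih (some k) o (out2 ++ [(t, v)]) (Or.inr (by simp))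
    · rcases h with h | h
      · subst h
        simp at hne
      · rw [if_neg hne, if_neg hne]
        rw [List.getLast?_append_of_ne_nil o h, List.dropLast_append_of_ne_nil h]
        split
        · rw [List.append_assoc]
          exact ih prev o (out2.dropLast ++ [(t, v)]) (Or.inr (by simp))
        · exact ih prev o out2 (Or.inr h)
lemma sKeyed_nil_left (ts : List Int) : sKeyed [] ts = [] := by
  cases ts <;> rw [sKeyed.eq_def]
lemma sKeyed_nil_right (hs : List (Int × Int)) : sKeyed hs [] = [] := by
  cases hs <;> rw [sKeyed.eq_def]
lemma reduceA_append (c : List (Int × Int)) (h : Int × Int) (hc : c ≠ []) :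
    reduceA (c ++ [h]) = if h.2 > (reduceA c).2 then h else reduceA c := by
  obtain ⟨x, rest, rfl⟩ := List.exists_cons_of_ne_nil hc
  simp [reduceA, List.foldl_append]
lemma loopA_eq (hs ls cur res : List (Int × Int)) :
    loopA hs ls cur res = res ++
      (if cur = [] then runReduce (sKeyed hs (ls.map Prod.fst)) none []
       else runReduce (sKeyed hs (ls.map Prod.fst)) (some 0) [reduceA cur]) := by
  fun_induction loopA hs ls cur res with
  | case1 h hs' l ls' cur res hlt ih =>
    rw [ih]
    simp only [List.map_cons]
    have hsk : sKeyed (h :: hs') (l.1 :: ls'.map Prod.fst)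
        = (0, h) :: sKeyed hs' (l.1 :: ls'.map Prod.fst) := by
      rw [sKeyed, if_neg (by omega)]
    by_cases hcur : cur = []
    · subst hcur
      simp [hsk, runReduce, reduceA]
    · rw [if_neg hcur, if_neg (by simp [hcur]), hsk]
      rw [runReduce, if_neg (by simp)]
      simp only [List.getLast?_singleton, Option.getD_some, List.dropLast_singleton,
        List.nil_append]
      rw [reduceA_append cur h hcur]
      by_cases hgt : h.2 > (reduceA cur).2
      · simp [hgt]
      · simp [hgt]
  | case2 h hs' l ls' res hlt ih =>
    rw [ih]
    simp only [List.map_cons]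
    rw [sKeyed, if_pos (show l.1 ≤ h.1 by omega)]
    have := runReduce_shift (sKeyed (h :: hs') (ls'.map Prod.fst)) 1 none []
    simpa using this.symm
  | case3 h hs' l ls' cur res hlt hcur ih =>
    rw [ih]
    simp only [if_neg hcur, List.map_cons]
    rw [sKeyed, if_pos (show l.1 ≤ h.1 by omega)]
    rw [runReduce_shift1_some0]
    have hshift := runReduce_shift (sKeyed (h :: hs') (ls'.map Prod.fst)) 1 none [reduceA cur]
    simp only [Option.map_none] at hshift
    rw [hshift]
    have happ := runReduce_append (sKeyed (h :: hs') (ls'.map Prod.fst)) none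
      [reduceA cur] [] (Or.inl rfl)
    simp only [List.append_nil] at happ
    rw [happ, if_pos trivial, List.append_assoc]
  | case4 a b c d =>
    have hsk : sKeyed a (b.map Prod.fst) = [] := by
      cases a with
      | nil => exact sKeyed_nil_left _
      | cons a1 as =>
        cases b with
        | nil => exact sKeyed_nil_right _
        | cons b1 bs => exact (d a1 as b1 bs rfl rfl).elim
    simp [hsk, runReduce]
  | case5 a b c d e hne =>
    have hsk : sKeyed a (b.map Prod.fst) = [] := by
      cases a with
      | nil => exact sKeyed_nil_left _
      | cons a1 as =>
        cases b with
        | nil => exact sKeyed_nil_right _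
        | cons b1 bs => exact (e a1 as b1 bs rfl rfl).elim
    rw [if_neg hne, hsk]
    simp [runReduce]

-- ===== VERDICT (by name: the statement is the Claim_ definition above) =====
theorem highest_highs_spec : Claim_equal_highest_highs := by
  intro tshighs tslows _ hpre
  obtain ⟨hh, hl⟩ := hpre
  have e1 : PySem.List.pyGet? tslows (-1) = some (tslows.getLast hl) := by
    rw [PySem.List.pyGet?_neg_one, List.getLast?_eq_getLast hl]
  have e2 : PySem.List.pyGet? tshighs (-1) = some (tshighs.getLast hh) := by
    rw [PySem.List.pyGet?_neg_one, List.getLast?_eq_getLast hh]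
  have e3 : PySem.List.pyGet? (tslows.map Prod.fst) (-1)
      = some ((tslows.getLast hl).1) := by
    rw [PySem.List.pyGet?_neg_one, List.getLast?_map, List.getLast?_eq_getLast hl]
    rfl
  unfold Spec_highest_highs highest_highs highest_highs_alt
  simp only [e1, e2, e3]
  rw [loopA_eq, keyLoop_eq _ _ 0 (Nat.zero_le _), List.drop_zero]
  by_cases hc : (tslows.getLast hl).1 ≤ (tshighs.getLast hh).1
  · simp only [if_pos hc, List.map_append, List.map_cons, List.map_nil]
    simp [shiftK]
  · simp only [if_neg hc]
    simp [shiftK]
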